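-- pv_equiv track=rewrite | github.com/phamvanson12398/bkad123 | Core_API/functions/Abnormal/abnormal_api.py | verify_input
-- ===== SOURCE A (Python) =====
-- def verify_input(data):
-- 	try:
-- 		str_error = ""
-- 		for param in data:
-- 			if param != "status":
-- 				str_error += "Request Data Error!"
-- 		return str_error
-- 	except Exception as exp:
-- 		print (exp)
-- 		return False
-- ===== SOURCE B (Python) =====
-- def verify_input(data):
-- 	try:
-- 		return "Request Data Error!" * sum(1 for p in data if p != "status")
-- 	except Exception as exp:
-- 		print (exp)
-- 		return False
-- ===== Notes on version B (the rewrite author's own statement) =====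
-- stated objective: simpler
-- what changed: Replaces the loop that concatenates the error string per offending element with counting the non-'status' elements once and multiplying the constant string by that count.
import Mathlib
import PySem

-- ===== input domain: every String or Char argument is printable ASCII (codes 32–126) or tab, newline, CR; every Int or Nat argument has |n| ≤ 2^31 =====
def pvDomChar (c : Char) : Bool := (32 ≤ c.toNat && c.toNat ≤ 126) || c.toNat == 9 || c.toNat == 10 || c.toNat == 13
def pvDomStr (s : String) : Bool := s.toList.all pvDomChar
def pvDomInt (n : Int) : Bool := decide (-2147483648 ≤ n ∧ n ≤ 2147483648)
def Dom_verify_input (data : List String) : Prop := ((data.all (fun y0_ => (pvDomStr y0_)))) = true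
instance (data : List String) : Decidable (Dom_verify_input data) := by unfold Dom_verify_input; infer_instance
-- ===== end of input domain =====

-- B changes the accumulator: it counts the non-"status" elements and repeats the constant
-- message that many times, instead of concatenating inside the loop (objective: simpler).
-- The Python try/except never fires for a list of strings, so both functions are total here.

-- the constant message, as a character list (String ops are ported on the List Char side)
def pvErrMsg : List Char := "Request Data Error!".toList

-- ===== PORT A =====
-- A: str_error = ""; for param in data: if param != "status": str_error += "Request Data Error!"
def verify_input (data : List String) : String :=
  String.ofList (data.foldl (fun acc param => if param ≠ "status" then acc ++ pvErrMsg else acc) [])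

-- ===== PORT B =====
-- B: "Request Data Error!" * sum(1 for p in data if p != "status")
def verify_input_alt (data : List String) : String :=
  String.ofList (List.flatten (List.replicate (data.countP (fun p => p ≠ "status")) pvErrMsg))

-- ===== PRECONDITION & SPEC =====
def Spec_verify_input (data : List String) (out : String) : Prop := out = verify_input_alt data
instance (data : List String) (out : String) : Decidable (Spec_verify_input data out) := by unfold Spec_verify_input; infer_instance

-- ===== CLAIM (what is proved, stated in full; the proofs are below) =====
def Claim_equal_verify_input : Prop := ∀ (data : List String), Dom_verify_input data → Spec_verify_input data (verify_input data)

-- ===== LEMMAS AND PROOFS =====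
-- loop invariant: A's fold starting from acc equals acc followed by B's repeated message
theorem verify_input_fold_eq (data : List String) (acc : List Char) :
    data.foldl (fun acc param => if param ≠ "status" then acc ++ pvErrMsg else acc) acc
      = acc ++ List.flatten (List.replicate (data.countP (fun p => p ≠ "status")) pvErrMsg) := by
  induction data generalizing acc with
  | nil => simp
  | cons a l ih =>
    rw [List.foldl_cons, ih]
    by_cases h : a = "status" <;> simp [h, List.replicate_succ]

-- ===== VERDICT (by name: the statement is the Claim_ definition above) =====
theorem verify_input_spec : Claim_equal_verify_input := by
  intro data _
  unfold Spec_verify_input verify_input verify_input_alt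
  rw [verify_input_fold_eq, List.nil_append]
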